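-- pv_equiv track=rewrite | github.com/ArooshiVermaIB/optimum-onnx-ibformers | ibformers/data/predict_table.py | doc_page_iter
-- ===== SOURCE A (Python) =====
-- from typing import Tuple, List, Iterator, Dict, Any
--
-- def doc_page_iter(doc_ids: List[str], page_numbers: List[int]) -> Iterator[Tuple[str, int, int, int, int]]:
--     """
--     Get an iterator of dataset index ranges that group together examples from the same document and page.
--     :param doc_ids: list of document ids
--     :param page_numbers: list of page numbers
--     :return: Iterator of tuples
--     """
--     from_idx = 0
--     next_doc_ids = doc_ids[1:] + ["*end*"]
--     next_page_numbers = page_numbers[1:] + [-1]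
--     for i, (doc_id, next_doc_id, page_no, next_page_no) in enumerate(
--         zip(doc_ids, next_doc_ids, page_numbers, next_page_numbers)
--     ):
--         if doc_id != next_doc_id or page_no != next_page_no:
--             yield doc_id, page_no, from_idx, i + 1, i
--             from_idx = i + 1
-- ===== SOURCE B (Python) =====
-- from itertools import groupby
-- from typing import Tuple, List, Iterator
--
--
-- def doc_page_iter(doc_ids: List[str], page_numbers: List[int]) -> Iterator[Tuple[str, int, int, int, int]]:
--     from_idx = 0
--     for (doc_id, page_no), grp in groupby(zip(doc_ids, page_numbers)):
--         to_idx = from_idx + sum(1 for _ in grp)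
--         yield doc_id, page_no, from_idx, to_idx, to_idx - 1
--         from_idx = to_idx
-- ===== Notes on version B (the rewrite author's own statement) =====
-- stated objective: idiomatic
-- what changed: Replaces the shifted-lists sentinel lookahead with itertools.groupby over zip(doc_ids, page_numbers), yielding one tuple per consecutive run with a running offset.
-- intended difference: On inputs where the last zipped (doc_id, page) pair equals its lookahead pair (the sentinel '*end*'/-1 or, under zip truncation, the real next element of the longer list), A silently drops the final group while B yields it; B's value is intended since '*end*' and -1 are meant as impossible markers. — e.g. on doc_page_iter(["*end*"], [-1]): A returns [], B returns [("*end*", -1, 0, 1, 0)]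
import Mathlib
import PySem

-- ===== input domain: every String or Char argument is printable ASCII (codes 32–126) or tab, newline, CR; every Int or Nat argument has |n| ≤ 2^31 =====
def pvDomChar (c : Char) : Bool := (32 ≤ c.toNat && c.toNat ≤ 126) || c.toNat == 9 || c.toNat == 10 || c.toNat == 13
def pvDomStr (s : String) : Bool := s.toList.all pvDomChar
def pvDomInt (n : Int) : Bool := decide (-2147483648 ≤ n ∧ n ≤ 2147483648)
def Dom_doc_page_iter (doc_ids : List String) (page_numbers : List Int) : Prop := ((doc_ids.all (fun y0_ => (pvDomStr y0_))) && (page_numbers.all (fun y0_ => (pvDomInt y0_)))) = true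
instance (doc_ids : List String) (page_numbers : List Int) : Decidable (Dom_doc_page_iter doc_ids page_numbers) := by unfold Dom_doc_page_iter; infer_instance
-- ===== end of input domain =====

-- B replaces A's shifted-lists sentinel lookahead by grouping consecutive equal (doc_id, page) pairs
-- (itertools.groupby) with a running offset; A is a generator, equivalence is about the yielded sequence.


-- ===== PORT A =====
-- the loop body: state = (i, from_idx); enumerated zip of the four lists
def docPageAuxA : List ((String × String) × (Int × Int)) → Int → Int → List (String × Int × Int × Int × Int)
  | [], _, _ => []
  | ((d, nd), (p, np)) :: rest, i, fromIdx =>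
    if d ≠ nd ∨ p ≠ np then
      (d, p, fromIdx, i + 1, i) :: docPageAuxA rest (i + 1) (i + 1)
    else
      docPageAuxA rest (i + 1) fromIdx

def doc_page_iter (doc_ids : List String) (page_numbers : List Int) : List (String × Int × Int × Int × Int) :=
  let next_doc_ids := doc_ids.drop 1 ++ ["*end*"]
  let next_page_numbers := page_numbers.drop 1 ++ [-1]
  docPageAuxA ((doc_ids.zip next_doc_ids).zip (page_numbers.zip next_page_numbers)) 0 0

-- ===== PORT B =====
-- groupby over zip: single pass holding (current key z, its start fromIdx, its count cnt);
-- emit the group's tuple when the key changes and once at the end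
def docPageAuxB : List (String × Int) → (String × Int) → Int → Int → List (String × Int × Int × Int × Int)
  | [], z, fromIdx, cnt => [(z.1, z.2, fromIdx, fromIdx + cnt, fromIdx + cnt - 1)]
  | w :: rest, z, fromIdx, cnt =>
    if w == z then
      docPageAuxB rest z fromIdx (cnt + 1)
    else
      (z.1, z.2, fromIdx, fromIdx + cnt, fromIdx + cnt - 1) :: docPageAuxB rest w (fromIdx + cnt) 1

def docPageB : List (String × Int) → Int → List (String × Int × Int × Int × Int)
  | [], _ => []
  | z :: rest, fromIdx => docPageAuxB rest z fromIdx 1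

def doc_page_iter_alt (doc_ids : List String) (page_numbers : List Int) : List (String × Int × Int × Int × Int) :=
  docPageB (doc_ids.zip page_numbers) 0

-- ===== PRECONDITION & SPEC =====
-- On inputs where the last zipped (doc_id, page) pair equals its lookahead pair (the sentinel '*end*'/-1
-- or, under zip truncation, the real next element of the longer list), A silently drops the final group
-- while B yields it; B's value is intended since '*end*' and -1 are meant as impossible markers.
def D_doc_page_iter (doc_ids : List String) (page_numbers : List Int) : Prop :=
  (doc_ids.zip page_numbers).getLast? =
    some ((doc_ids[min doc_ids.length page_numbers.length]?).getD "*end*",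
          (page_numbers[min doc_ids.length page_numbers.length]?).getD (-1))
instance (doc_ids : List String) (page_numbers : List Int) : Decidable (D_doc_page_iter doc_ids page_numbers) := by unfold D_doc_page_iter; infer_instance

def Spec_doc_page_iter (doc_ids : List String) (page_numbers : List Int) (out : List (String × Int × Int × Int × Int)) : Prop := ¬ D_doc_page_iter doc_ids page_numbers → out = doc_page_iter_alt doc_ids page_numbers
instance (doc_ids : List String) (page_numbers : List Int) (out : List (String × Int × Int × Int × Int)) : Decidable (Spec_doc_page_iter doc_ids page_numbers out) := by unfold Spec_doc_page_iter; infer_instance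

def pvDiffWitness_doc_page_iter : List String × List Int := (["*end*"], [-1])
def pvDiffWitnessOut_doc_page_iter : (List (String × Int × Int × Int × Int)) × (List (String × Int × Int × Int × Int)) :=
  ([], [("*end*", -1, 0, 1, 0)])

-- ===== CLAIM (what is proved, stated in full; the proofs are below) =====
def Claim_unchanged_doc_page_iter : Prop := ∀ (doc_ids : List String) (page_numbers : List Int), Dom_doc_page_iter doc_ids page_numbers → Spec_doc_page_iter doc_ids page_numbers (doc_page_iter doc_ids page_numbers)
def Claim_changed_doc_page_iter : Prop := Dom_doc_page_iter (pvDiffWitness_doc_page_iter.1) (pvDiffWitness_doc_page_iter.2) ∧ D_doc_page_iter (pvDiffWitness_doc_page_iter.1) (pvDiffWitness_doc_page_iter.2) ∧ doc_page_iter (pvDiffWitness_doc_page_iter.1) (pvDiffWitness_doc_page_iter.2) = pvDiffWitnessOut_doc_page_iter.1 ∧ doc_page_iter_alt (pvDiffWitness_doc_page_iter.1) (pvDiffWitness_doc_page_iter.2) = pvDiffWitnessOut_doc_page_iter.2 ∧ pvDiffWitnessOut_doc_page_iter.1 ≠ pvDiffWitnessOut_doc_page_iter.2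
def Claim_exact_doc_page_iter : Prop := ∀ (doc_ids : List String) (page_numbers : List Int), Dom_doc_page_iter doc_ids page_numbers → D_doc_page_iter doc_ids page_numbers → doc_page_iter doc_ids page_numbers ≠ doc_page_iter_alt doc_ids page_numbers

-- ===== LEMMAS AND PROOFS =====

-- the zipped input with each element paired with its lookahead; the last lookahead is q
def laList : List (String × Int) → (String × Int) → List ((String × String) × (Int × Int))
  | [], _ => []
  | [z], q => [((z.1, q.1), (z.2, q.2))]
  | z :: w :: zs, q => ((z.1, w.1), (z.2, w.2)) :: laList (w :: zs) q

lemma laList_cons (z : String × Int) (zs : List (String × Int)) (q : String × Int) :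
    laList (z :: zs) q = ((z.1, (zs.headD q).1), (z.2, (zs.headD q).2)) :: laList zs q := by
  cases zs <;> rfl

-- A's zip of the four lists is exactly laList of the zipped input with sentinel-or-next lookahead
lemma zip_eq_laList : ∀ (ds : List String) (ps : List Int),
    (ds.zip (ds.drop 1 ++ ["*end*"])).zip (ps.zip (ps.drop 1 ++ [-1]))
      = laList (ds.zip ps) ((ds[min ds.length ps.length]?).getD "*end*",
                            (ps[min ds.length ps.length]?).getD (-1)) := by
  intro ds
  induction ds with
  | nil => intro ps; simp [laList]
  | cons d ds ih =>
    intro ps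
    cases ps with
    | nil => simp [laList]
    | cons p ps =>
      cases ds with
      | nil =>
        cases ps with
        | nil => simp [laList]
        | cons p' ps' => simp [laList]
      | cons d' ds' =>
        cases ps with
        | nil => simp [laList]
        | cons p' ps' =>
          have h := ih (p' :: ps')
          simp only [List.drop_one, List.zip_cons_cons, List.tail_cons] at h ⊢
          rw [laList_cons]
          simp only [List.headD_cons]
          rw [List.cons_append, List.cons_append]
          simp only [List.zip_cons_cons]
          rw [h]
          simp [Nat.succ_min_succ]

lemma run_eq_replicate (z : String × Int) (l : List (String × Int)) :
    l.takeWhile (fun w => w == z) = List.replicate (l.takeWhile (fun w => w == z)).length z := by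
  apply List.eq_replicate_of_mem
  intro b hb
  have := List.mem_takeWhile_imp hb
  simpa using this

-- A consumes one maximal run: no yield inside the run, one yield at its end (lookahead differs)
lemma runA (k : ℕ) : ∀ (z : String × Int) (zs : List (String × Int)) (q : String × Int)
    (i f : Int), zs.headD q ≠ z →
    docPageAuxA (laList (List.replicate (k + 1) z ++ zs) q) i f
      = (z.1, z.2, f, i + (k : Int) + 1, i + (k : Int)) :: docPageAuxA (laList zs q) (i + (k : Int) + 1) (i + (k : Int) + 1) := by
  induction k with
  | zero =>
    rintro ⟨d, p⟩ zs q i f h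
    rw [List.replicate_one, List.singleton_append, laList_cons]
    have hcond : d ≠ (zs.headD q).1 ∨ p ≠ (zs.headD q).2 := by
      by_contra hc
      push_neg at hc
      exact h (by rw [← Prod.mk.eta (p := zs.headD q), ← hc.1, ← hc.2])
    simp only [docPageAuxA, if_pos hcond]
    norm_num
  | succ k ih =>
    rintro ⟨d, p⟩ zs q i f h
    have hrep : List.replicate (k + 2) ((d, p) : String × Int) ++ zs = (d, p) :: (List.replicate (k + 1) (d, p) ++ zs) := by
      rw [List.replicate_succ, List.cons_append]
    rw [hrep, laList_cons]
    have hhead : ((List.replicate (k + 1) ((d, p) : String × Int) ++ zs).headD q) = (d, p) := by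
      rw [List.replicate_succ, List.cons_append, List.headD_cons]
    rw [hhead]
    have hcond : ¬ (d ≠ d ∨ p ≠ p) := by simp
    simp only [docPageAuxA, if_neg hcond]
    rw [ih (d, p) zs q (i + 1) f h]
    have h1 : i + 1 + (k : Int) + 1 = i + ((k : Int) + 1) + 1 := by ring
    have h2 : i + 1 + (k : Int) = i + ((k : Int) + 1) := by ring
    rw [h1, h2]
    push_cast
    ring_nf

-- A yields nothing on a final run whose value equals the sentinel lookahead
lemma runA_end (k : ℕ) : ∀ (z : String × Int) (i f : Int),
    docPageAuxA (laList (List.replicate (k + 1) z) z) i f = [] := by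
  induction k with
  | zero =>
    rintro ⟨d, p⟩ i f
    simp [laList, docPageAuxA]
  | succ k ih =>
    rintro ⟨d, p⟩ i f
    have hrep : List.replicate (k + 2) ((d, p) : String × Int) = (d, p) :: List.replicate (k + 1) (d, p) := by
      rw [List.replicate_succ]
    rw [hrep, laList_cons]
    have hhead : (List.replicate (k + 1) ((d, p) : String × Int)).headD (d, p) = (d, p) := by
      rw [List.replicate_succ, List.headD_cons]
    rw [hhead]
    have hcond : ¬ (d ≠ d ∨ p ≠ p) := by simp
    simp only [docPageAuxA, if_neg hcond]
    exact ih (d, p) (i + 1) f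

-- B emits one tuple per maximal run: run entirely before end of input
lemma runB_nil (k : ℕ) : ∀ (z : String × Int) (f cnt : Int),
    docPageAuxB (List.replicate k z) z f cnt = [(z.1, z.2, f, f + cnt + (k : Int), f + cnt + (k : Int) - 1)] := by
  induction k with
  | zero =>
    intro z f cnt
    simp [docPageAuxB]
  | succ k ih =>
    intro z f cnt
    rw [List.replicate_succ]
    simp only [docPageAuxB, BEq.rfl, if_true]
    rw [ih z f (cnt + 1)]
    have : f + (cnt + 1) + (k : Int) = f + cnt + ((k : Int) + 1) := by ring
    rw [this]
    push_cast
    ring_nf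

-- B emits one tuple per maximal run: run followed by a different key
lemma runB_cons (k : ℕ) : ∀ (z a : String × Int) (t : List (String × Int)) (f cnt : Int), a ≠ z →
    docPageAuxB (List.replicate k z ++ a :: t) z f cnt
      = (z.1, z.2, f, f + cnt + (k : Int), f + cnt + (k : Int) - 1) :: docPageAuxB t a (f + cnt + (k : Int)) 1 := by
  induction k with
  | zero =>
    intro z a t f cnt ha
    have hne : (a == z) = false := by simpa using ha
    simp [docPageAuxB, hne]
  | succ k ih =>
    intro z a t f cnt ha
    rw [List.replicate_succ, List.cons_append]
    simp only [docPageAuxB, BEq.rfl, if_true]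
    rw [ih z a t f (cnt + 1) ha]
    have : f + (cnt + 1) + (k : Int) = f + cnt + ((k : Int) + 1) := by ring
    rw [this]
    push_cast
    ring_nf

-- B never returns the empty list on a nonempty input
lemma docPageAuxB_ne_nil : ∀ (l : List (String × Int)) (z : String × Int) (f cnt : Int),
    docPageAuxB l z f cnt ≠ [] := by
  intro l
  induction l with
  | nil => intro z f cnt; simp [docPageAuxB]
  | cons w rest ih =>
    intro z f cnt
    simp only [docPageAuxB]
    split
    · exact ih z f (cnt + 1)
    · simp

-- head of the dropped-while suffix is never z
lemma dropWhile_head_ne (z a : String × Int) (l t : List (String × Int))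
    (h : l.dropWhile (fun w => w == z) = a :: t) : a ≠ z := by
  have hh := List.head?_dropWhile_not (fun w => w == z) l
  rw [h] at hh
  simp only [List.head?_cons] at hh
  simpa using hh

-- main agreement: when the last element differs from the lookahead q, A over laList equals B
lemma mainEq (n : ℕ) : ∀ (zs : List (String × Int)), zs.length ≤ n → ∀ (q : String × Int) (f : Int),
    (∀ l, zs.getLast? = some l → l ≠ q) →
    docPageAuxA (laList zs q) f f = docPageB zs f := by
  induction n with
  | zero =>
    intro zs hlen q f _
    rw [List.length_eq_zero_iff.mp (Nat.le_zero.mp hlen)]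
    simp [laList, docPageAuxA, docPageB]
  | succ n ih =>
    intro zs hlen q f hlast
    match zs with
    | [] => simp [laList, docPageAuxA, docPageB]
    | z :: rest =>
      set k := (rest.takeWhile (fun w => w == z)).length with hk
      have hsplit : rest = List.replicate k z ++ rest.dropWhile (fun w => w == z) := by
        conv_lhs => rw [← List.takeWhile_append_dropWhile (p := fun w => w == z) (l := rest)]
        rw [← run_eq_replicate]
      have hzs : z :: rest = List.replicate (k + 1) z ++ rest.dropWhile (fun w => w == z) := by
        rw [List.replicate_succ, List.cons_append, ← hsplit]
      set rest' := rest.dropWhile (fun w => w == z) with hrest'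
      have hlen' : rest'.length ≤ n := by
        have h1 : rest'.length ≤ rest.length := List.length_dropWhile_le _ _
        simp only [List.length_cons] at hlen
        omega
      cases hr : rest' with
      | nil =>
        have hlz : (z :: rest).getLast? = some z := by
          rw [hzs, hr, List.append_nil, List.getLast?_replicate]
          simp
        have hhead : ([] : List (String × Int)).headD q ≠ z := by
          simp only [List.headD_nil]
          intro hq
          exact hlast z hlz hq.symm
        conv_lhs => rw [hzs, hr, List.append_nil,
          show List.replicate (k + 1) z = List.replicate (k + 1) z ++ ([] : List (String × Int)) by simp,
          runA k z [] q f f hhead]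
        show _ = docPageAuxB rest z f 1
        rw [hsplit, hr, List.append_nil, runB_nil k z f 1]
        simp only [laList, docPageAuxA]
        norm_num
        omega
      | cons a t =>
        have ha : a ≠ z := dropWhile_head_ne z a rest t (hrest'.symm.trans hr)
        have hhead : rest'.headD q ≠ z := by
          rw [hr]; simpa using ha
        conv_lhs => rw [hzs, runA k z rest' q f f hhead]
        show _ = docPageAuxB rest z f 1
        rw [hsplit, hr, runB_cons k z a t f 1 ha]
        have hl' : ∀ l, rest'.getLast? = some l → l ≠ q := by
          intro l hl hlq
          apply hlast l _ hlq
          rw [hzs, List.getLast?_append_of_ne_nil]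
          · exact hl
          · rw [hr]; simp
        have hrec := ih rest' hlen' q (f + 1 + (k : Int)) hl'
        rw [hr] at hrec
        have hB : docPageB (a :: t) (f + 1 + (k : Int)) = docPageAuxB t a (f + 1 + (k : Int)) 1 := rfl
        rw [hB] at hrec
        have e1 : f + (k : Int) + 1 = f + 1 + (k : Int) := by ring
        have e2 : f + (k : Int) = f + 1 + (k : Int) - 1 := by ring
        rw [e1, e2, hrec]

-- inside D_: A over laList equals B with its last tuple dropped
lemma mainDrop (n : ℕ) : ∀ (zs : List (String × Int)), zs.length ≤ n → ∀ (q : String × Int) (f : Int),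
    zs.getLast? = some q →
    docPageAuxA (laList zs q) f f = (docPageB zs f).dropLast := by
  induction n with
  | zero =>
    intro zs hlen q f hlast
    rw [List.length_eq_zero_iff.mp (Nat.le_zero.mp hlen)] at hlast
    simp at hlast
  | succ n ih =>
    intro zs hlen q f hlast
    match zs with
    | [] => simp at hlast
    | z :: rest =>
      set k := (rest.takeWhile (fun w => w == z)).length with hk
      have hsplit : rest = List.replicate k z ++ rest.dropWhile (fun w => w == z) := by
        conv_lhs => rw [← List.takeWhile_append_dropWhile (p := fun w => w == z) (l := rest)]
        rw [← run_eq_replicate]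
      have hzs : z :: rest = List.replicate (k + 1) z ++ rest.dropWhile (fun w => w == z) := by
        rw [List.replicate_succ, List.cons_append, ← hsplit]
      set rest' := rest.dropWhile (fun w => w == z) with hrest'
      have hlen' : rest'.length ≤ n := by
        have h1 : rest'.length ≤ rest.length := List.length_dropWhile_le _ _
        simp only [List.length_cons] at hlen
        omega
      cases hr : rest' with
      | nil =>
        -- the whole list is the final run; its value is q: A yields nothing, B yields one tuple
        have hlz : (z :: rest).getLast? = some z := by
          rw [hzs, hr, List.append_nil, List.getLast?_replicate]
          simp
        rw [hlz] at hlast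
        have hzq : z = q := Option.some_inj.mp hlast
        subst hzq
        conv_lhs => rw [hzs, hr, List.append_nil, runA_end k z f f]
        show _ = (docPageAuxB rest z f 1).dropLast
        rw [hsplit, hr, List.append_nil, runB_nil k z f 1]
        simp
      | cons a t =>
        have ha : a ≠ z := dropWhile_head_ne z a rest t (hrest'.symm.trans hr)
        have hhead : rest'.headD q ≠ z := by
          rw [hr]; simpa using ha
        conv_lhs => rw [hzs, runA k z rest' q f f hhead]
        show _ = (docPageAuxB rest z f 1).dropLast
        rw [hsplit, hr, runB_cons k z a t f 1 ha]
        have hlast' : rest'.getLast? = some q := by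
          rw [hzs, List.getLast?_append_of_ne_nil] at hlast
          · exact hlast
          · rw [hr]; simp
        have hrec := ih rest' hlen' q (f + 1 + (k : Int)) hlast'
        rw [hr] at hrec
        have hB : docPageB (a :: t) (f + 1 + (k : Int)) = docPageAuxB t a (f + 1 + (k : Int)) 1 := rfl
        rw [hB] at hrec
        rw [List.dropLast_cons_of_ne_nil (docPageAuxB_ne_nil t a (f + 1 + (k : Int)) 1)]
        have e1 : f + (k : Int) + 1 = f + 1 + (k : Int) := by ring
        have e2 : f + (k : Int) = f + 1 + (k : Int) - 1 := by ring
        rw [e1, e2, hrec]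

-- ===== VERDICT (by name: the statement is the Claim_ definition above) =====
theorem doc_page_iter_spec : Claim_unchanged_doc_page_iter := by
  intro ds ps _ hD
  show docPageAuxA ((ds.zip (ds.drop 1 ++ ["*end*"])).zip (ps.zip (ps.drop 1 ++ [-1]))) 0 0
      = docPageB (ds.zip ps) 0
  rw [zip_eq_laList]
  apply mainEq (ds.zip ps).length _ (le_refl _)
  intro l hl hlq
  apply hD
  unfold D_doc_page_iter
  rw [hl, hlq]

theorem doc_page_iter_changed : Claim_changed_doc_page_iter := by
  unfold Claim_changed_doc_page_iter
  refine ⟨by decide, by decide, by decide, by decide, by decide⟩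

theorem doc_page_iter_tight : Claim_exact_doc_page_iter := by
  intro ds ps _ hD
  unfold D_doc_page_iter at hD
  show docPageAuxA ((ds.zip (ds.drop 1 ++ ["*end*"])).zip (ps.zip (ps.drop 1 ++ [-1]))) 0 0
      ≠ docPageB (ds.zip ps) 0
  rw [zip_eq_laList]
  rw [mainDrop (ds.zip ps).length _ (le_refl _) _ 0 hD]
  cases hz : ds.zip ps with
  | nil => rw [hz] at hD; simp at hD
  | cons z rest =>
    intro heq
    have hne : docPageB (z :: rest) 0 ≠ [] := docPageAuxB_ne_nil rest z 0 1
    have hlt : (docPageB (z :: rest) 0).dropLast.length < (docPageB (z :: rest) 0).length := by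
      cases hB : docPageB (z :: rest) 0 with
      | nil => exact absurd hB hne
      | cons b bs => simp [List.length_dropLast]
    rw [heq] at hlt
    exact Nat.lt_irrefl _ hlt
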